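-- pv_equiv track=rewrite | github.com/SahanaGaneshvel/Real-time-Phishing-URL-Detection | model/feature_extractor.py | _has_random_pattern
-- ===== SOURCE A (Python) =====
-- def _has_random_pattern(domain):
--     """Check if domain has random string patterns"""
--     # Simple heuristic: check for long sequences of random characters
--     random_chars = 0
--     for char in domain:
--         if char.isalnum() and not char.isdigit():
--             random_chars += 1
--         else:
--             random_chars = 0
--
--         if random_chars > 10:  # Long random sequence
--             return True
--
--     return False
-- ===== SOURCE B (Python) =====
-- def _has_random_pattern(domain):
--     """Check if domain has random string patterns"""
--     # Partition the domain into maximal runs of letter-like characters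
--     # and test each run's length, instead of a reset-counter scan.
--     i, n = 0, len(domain)
--     while i < n:
--         if domain[i].isalnum() and not domain[i].isdigit():
--             j = i
--             while j < n and domain[j].isalnum() and not domain[j].isdigit():
--                 j += 1
--             if j - i > 10:
--                 return True
--             i = j
--         else:
--             i += 1
--     return False
-- ===== Notes on version B (the rewrite author's own statement) =====
-- stated objective: alternative
-- what changed: Replaces A's incremental reset-counter pass with a run-decomposition: B skips to each maximal run of letter-like characters, measures it in one inner scan, and tests its length against 10.
import Mathlib
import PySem

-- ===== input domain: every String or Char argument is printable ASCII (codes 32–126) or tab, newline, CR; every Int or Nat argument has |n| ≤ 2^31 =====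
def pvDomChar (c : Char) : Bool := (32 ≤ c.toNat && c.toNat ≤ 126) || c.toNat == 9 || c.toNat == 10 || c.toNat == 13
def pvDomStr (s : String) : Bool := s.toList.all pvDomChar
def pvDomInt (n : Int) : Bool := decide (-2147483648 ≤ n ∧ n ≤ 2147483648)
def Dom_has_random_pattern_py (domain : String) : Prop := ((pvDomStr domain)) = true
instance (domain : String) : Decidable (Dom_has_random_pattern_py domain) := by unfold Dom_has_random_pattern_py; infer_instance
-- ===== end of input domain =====

-- B replaces A's reset-counter scan by a decomposition into maximal letter runs; same cost (objective: alternative).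

-- the character test both Pythons use: char.isalnum() and not char.isdigit()
def pvLetter (c : Char) : Bool := PySem.Chars.isalnum c && !(PySem.Chars.isdigit c)

-- ===== PORT A =====
-- A's loop: counter incremented on letters, reset otherwise, early True when it exceeds 10
def pvAGo : List Char → Int → Bool
  | [], _ => false
  | c :: rest, cnt =>
    let cnt' := if pvLetter c then cnt + 1 else 0
    if cnt' > 10 then true else pvAGo rest cnt'

def has_random_pattern_py (domain : String) : Bool := pvAGo domain.toList 0

-- ===== PORT B =====
-- B's loop: skip to each maximal run of letters, measure it, test its length (> 10)
def pvBGo : List Char → Bool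
  | [] => false
  | c :: rest =>
    if h : pvLetter c = true then
      let run := List.takeWhile pvLetter (c :: rest)
      if (run.length : Int) > 10 then true
      else pvBGo (List.dropWhile pvLetter (c :: rest))
    else pvBGo rest
  termination_by cs => cs.length
  decreasing_by
    · simp [List.dropWhile, h]
      exact List.length_dropWhile_le pvLetter rest
    · simp

def has_random_pattern_py_alt (domain : String) : Bool := pvBGo domain.toList

-- ===== PRECONDITION & SPEC =====
def Spec_has_random_pattern_py (domain : String) (out : Bool) : Prop := out = has_random_pattern_py_alt domain
instance (domain : String) (out : Bool) : Decidable (Spec_has_random_pattern_py domain out) := by unfold Spec_has_random_pattern_py; infer_instance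

-- ===== CLAIM (what is proved, stated in full; the proofs are below) =====
def Claim_equal_has_random_pattern_py : Prop := ∀ (domain : String), Dom_has_random_pattern_py domain → Spec_has_random_pattern_py domain (has_random_pattern_py domain)

-- ===== LEMMAS AND PROOFS =====

-- A's counter run: with 0 ≤ cnt ≤ 10 letters already counted, A returns true on the
-- leading letter run iff cnt plus the run length exceeds 10, else continues after the run with counter 0.
theorem pvAGo_run (cs : List Char) : ∀ cnt : Int, 0 ≤ cnt → cnt ≤ 10 →
    pvAGo cs cnt = (decide (cnt + (List.takeWhile pvLetter cs).length > 10) || pvAGo (List.dropWhile pvLetter cs) 0) := by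
  induction cs with
  | nil => intro cnt _ h10; simp [pvAGo]; omega
  | cons c rest ih =>
    intro cnt h0 h10
    by_cases h : pvLetter c = true
    · have htw : List.takeWhile pvLetter (c :: rest) = c :: List.takeWhile pvLetter rest := by
        simp [List.takeWhile, h]
      have hdw : List.dropWhile pvLetter (c :: rest) = List.dropWhile pvLetter rest := by
        simp [List.dropWhile, h]
      rw [htw, hdw]
      by_cases hbig : cnt + 1 > 10
      · have hA : pvAGo (c :: rest) cnt = true := by simp [pvAGo, h, hbig]
        have hd : decide (cnt + ((c :: List.takeWhile pvLetter rest).length : Int) > 10) = true := by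
          simp only [List.length_cons, decide_eq_true_eq]; push_cast; omega
        rw [hA, hd, Bool.true_or]
      · have hstep : pvAGo (c :: rest) cnt = pvAGo rest (cnt + 1) := by
          simp [pvAGo, h, hbig]
        rw [hstep, ih (cnt + 1) (by omega) (by omega)]
        congr 1
        rw [decide_eq_decide]
        simp only [List.length_cons]
        push_cast
        omega
    · have hz : ¬ ((0 : Int) > 10) := by omega
      have htw : List.takeWhile pvLetter (c :: rest) = [] := by simp [List.takeWhile, h]
      have hdw : List.dropWhile pvLetter (c :: rest) = c :: rest := by simp [List.dropWhile, h]
      have h1 : pvAGo (c :: rest) cnt = pvAGo rest 0 := by simp [pvAGo, h, hz]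
      have h2 : pvAGo (c :: rest) 0 = pvAGo rest 0 := by simp [pvAGo, h, hz]
      rw [htw, hdw, h1, h2]
      have hd : decide (cnt + (([] : List Char).length : Int) > 10) = false := by
        simp only [List.length_nil, decide_eq_false_iff_not]; push_cast; omega
      rw [hd, Bool.false_or]

-- main equivalence of the two loops, by strong induction on the length
theorem pvAGo_eq_pvBGo_bounded : ∀ n : Nat, ∀ cs : List Char, cs.length ≤ n → pvAGo cs 0 = pvBGo cs := by
  intro n
  induction n with
  | zero =>
    intro cs hlen
    match cs with
    | [] => simp [pvAGo, pvBGo]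
  | succ n ih =>
    intro cs hlen
    match cs with
    | [] => simp [pvAGo, pvBGo]
    | c :: rest =>
      by_cases h : pvLetter c = true
      · rw [pvAGo_run (c :: rest) 0 le_rfl (by omega)]
        have hdw : List.dropWhile pvLetter (c :: rest) = List.dropWhile pvLetter rest := by
          simp [List.dropWhile, h]
        have hle : (List.dropWhile pvLetter rest).length ≤ n := by
          have := List.length_dropWhile_le pvLetter rest
          simp at hlen; omega
        rw [hdw, ih _ hle]
        simp only [pvBGo, h, dif_pos]
        rw [hdw]
        by_cases hbig : ((List.takeWhile pvLetter (c :: rest)).length : Int) > 10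
        · simp [hbig]
        · simp [hbig]
      · have hz : ¬ ((0 : Int) > 10) := by omega
        have h0 : pvAGo (c :: rest) 0 = pvAGo rest 0 := by simp [pvAGo, h, hz]
        have hle : rest.length ≤ n := by simp at hlen; omega
        rw [h0, ih _ hle]
        simp [pvBGo, h]

-- ===== VERDICT (by name: the statement is the Claim_ definition above) =====
theorem has_random_pattern_py_spec : Claim_equal_has_random_pattern_py := by
  intro domain _
  unfold Spec_has_random_pattern_py has_random_pattern_py has_random_pattern_py_alt
  exact pvAGo_eq_pvBGo_bounded domain.toList.length domain.toList le_rfl
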